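-- pv_equiv track=rewrite | github.com/NeuroTafl/OpenTafl-Python | NeuroTaflAgent/Board.py | getRowPositionString
-- ===== SOURCE A (Python) =====
-- def getRowPositionString(rowList: list) -> str:
--     rowString = ""
--     currEmptyCount = 0
--     for piece in rowList:
--         if piece != "e":
--             if currEmptyCount != 0:
--                 rowString += str(currEmptyCount)
--                 currEmptyCount = 0
--             rowString += piece
--         else:
--             currEmptyCount += 1
--     if currEmptyCount != 0:
--         rowString += str(currEmptyCount)
--     return rowString
-- ===== SOURCE B (Python) =====
-- def getRowPositionString(rowList):
--     parts = []
--     i = 0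
--     n = len(rowList)
--     while i < n:
--         empty = rowList[i] == "e"
--         j = i
--         while j < n and (rowList[j] == "e") == empty:
--             j += 1
--         if empty:
--             parts.append(str(j - i))
--         else:
--             parts.append("".join(rowList[i:j]))
--         i = j
--     return "".join(parts)
-- ===== Notes on version B (the rewrite author's own statement) =====
-- stated objective: alternative
-- what changed: B scans the row run-by-run with two indices, emitting whole groups (count for an empty run, joined pieces for a non-empty run) into a list joined once, instead of A's single pass maintaining a running empty counter flushed at each transition.
import Mathlib
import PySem

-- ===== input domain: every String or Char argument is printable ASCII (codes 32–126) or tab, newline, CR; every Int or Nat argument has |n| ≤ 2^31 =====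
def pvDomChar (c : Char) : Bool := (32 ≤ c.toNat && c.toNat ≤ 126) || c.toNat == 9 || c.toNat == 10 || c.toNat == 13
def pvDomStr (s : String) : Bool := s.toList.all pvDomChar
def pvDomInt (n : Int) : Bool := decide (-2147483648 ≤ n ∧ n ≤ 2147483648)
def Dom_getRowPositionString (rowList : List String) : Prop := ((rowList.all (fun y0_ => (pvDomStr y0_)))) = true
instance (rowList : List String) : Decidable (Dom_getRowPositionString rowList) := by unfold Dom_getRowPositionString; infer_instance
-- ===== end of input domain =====

-- B scans the row run-by-run with two pointers, emitting whole groups at once, instead of A's running empty counter flushed at transitions; alternative decomposition, same cost.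

-- ===== PORT A =====
-- one loop step of A: flush the pending empty count on a piece, or bump it on "e"
def aStep (st : String × Int) (piece : String) : String × Int :=
  if piece ≠ "e" then
    ((if st.2 ≠ 0 then st.1 ++ PySem.Int.toStr st.2 else st.1) ++ piece, 0)
  else (st.1, st.2 + 1)

-- A's trailing flush after the loop
def aFin (st : String × Int) : String :=
  if st.2 ≠ 0 then st.1 ++ PySem.Int.toStr st.2 else st.1

def getRowPositionString (rowList : List String) : String :=
  aFin (rowList.foldl aStep ("", 0))

-- ===== PORT B =====
-- Source B's run scanner: take the maximal run with the head's emptiness, emit its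
-- count (empty run) or its concatenation (piece run), continue after it
def altGo : List String → List String
  | [] => []
  | x :: xs =>
    let empty := x == "e"
    let run := xs.takeWhile (fun y => (y == "e") == empty)
    let rest := xs.dropWhile (fun y => (y == "e") == empty)
    (if empty then PySem.Int.toStr ((run.length + 1 : Nat) : Int)
     else String.join (x :: run)) :: altGo rest
termination_by l => l.length
decreasing_by
  have := List.length_dropWhile_le (fun y => (y == "e") == (x == "e")) xs
  simp; omega

def getRowPositionString_alt (rowList : List String) : String :=
  String.join (altGo rowList)

-- ===== PRECONDITION & SPEC =====
def Spec_getRowPositionString (rowList : List String) (out : String) : Prop := out = getRowPositionString_alt rowList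
instance (rowList : List String) (out : String) : Decidable (Spec_getRowPositionString rowList out) := by unfold Spec_getRowPositionString; infer_instance

-- ===== CLAIM (what is proved, stated in full; the proofs are below) =====
def Claim_equal_getRowPositionString : Prop := ∀ (rowList : List String), Dom_getRowPositionString rowList → Spec_getRowPositionString rowList (getRowPositionString rowList)

-- ===== LEMMAS AND PROOFS =====

-- common reference: the row encoding with a pending empty count, recursively
def pad (c : Nat) : String := if c ≠ 0 then PySem.Int.toStr (c : Int) else ""

def specGo : List String → Nat → String
  | [], c => pad c
  | x :: xs, c => if x ≠ "e" then pad c ++ x ++ specGo xs 0 else specGo xs (c + 1)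

lemma join_foldl (l : List String) : ∀ (a b : String),
    List.foldl (fun r s => r ++ s) (a ++ b) l = a ++ List.foldl (fun r s => r ++ s) b l := by
  induction l with
  | nil => intro a b; rfl
  | cons y l ih => intro a b; simpa [String.append_assoc] using ih a (b ++ y)

lemma join_cons (y : String) (l : List String) :
    String.join (y :: l) = y ++ String.join l := by
  have h := join_foldl l y ""
  simpa [String.join] using h

lemma aLoop_spec (l : List String) : ∀ (s : String) (c : Nat),
    aFin (l.foldl aStep (s, (c : Int))) = s ++ specGo l c := by
  induction l with
  | nil =>
      intro s c
      by_cases h : c = 0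
      · subst h; simp [aFin, specGo, pad]
      · have hc : ((c : Int)) ≠ 0 := by exact_mod_cast h
        simp [aFin, specGo, pad, h]
  | cons x xs ih =>
      intro s c
      by_cases hx : x = "e"
      · subst hx
        rw [List.foldl_cons,
          show aStep (s, (c : Int)) "e" = (s, ((c + 1 : Nat) : Int)) from by
            simp [aStep],
          ih s (c + 1),
          show specGo ("e" :: xs) c = specGo xs (c + 1) from by simp [specGo]]
      · rw [List.foldl_cons,
          show aStep (s, (c : Int)) x
              = ((if (c : Int) ≠ 0 then s ++ PySem.Int.toStr (c : Int) else s) ++ x, ((0 : Nat) : Int)) from by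
            simp [aStep, hx],
          ih _ 0,
          show specGo (x :: xs) c = pad c ++ x ++ specGo xs 0 from by simp [specGo, hx]]
        by_cases h : c = 0
        · subst h; simp [pad, String.append_assoc]
        · have hc : ((c : Int)) ≠ 0 := by exact_mod_cast h
          simp [pad, h, String.append_assoc]

lemma head?_dropWhile_false (p : String → Bool) :
    ∀ (xs : List String) (y : String), (xs.dropWhile p).head? = some y → p y = false := by
  intro xs
  induction xs with
  | nil => intro y h; simp [List.dropWhile] at h
  | cons x xs ih =>
      intro y h
      by_cases hx : p x
      · rw [List.dropWhile_cons_of_pos hx] at h; exact ih y h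
      · rw [List.dropWhile_cons_of_neg hx] at h
        simp at h; subst h; simpa using hx

lemma specGo_empties : ∀ (run : List String) (rest : List String) (c : Nat),
    (∀ y ∈ run, y = "e") → specGo (run ++ rest) c = specGo rest (c + run.length) := by
  intro run
  induction run with
  | nil => intro rest c _; simp
  | cons y run ih =>
      intro rest c h
      have hy : y = "e" := h y (by simp)
      subst hy
      rw [List.cons_append,
        show specGo ("e" :: (run ++ rest)) c = specGo (run ++ rest) (c + 1) from by simp [specGo],
        ih rest (c + 1) (fun z hz => h z (by simp [hz]))]
      congr 1
      simp only [List.length_cons]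
      omega

lemma specGo_pieces : ∀ (run : List String) (rest : List String),
    (∀ y ∈ run, y ≠ "e") → specGo (run ++ rest) 0 = String.join run ++ specGo rest 0 := by
  intro run
  induction run with
  | nil => intro rest _; simp [String.join]
  | cons y run ih =>
      intro rest h
      have hy : y ≠ "e" := h y (by simp)
      rw [List.cons_append,
        show specGo (y :: (run ++ rest)) 0 = pad 0 ++ y ++ specGo (run ++ rest) 0 from by
          simp [specGo, hy],
        ih rest (fun z hz => h z (by simp [hz])), join_cons]
      simp [pad, String.append_assoc]

lemma specGo_flush (rest : List String) (c : Nat) (hc : c ≠ 0)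
    (h : ∀ y, rest.head? = some y → y ≠ "e") :
    specGo rest c = pad c ++ specGo rest 0 := by
  cases rest with
  | nil => simp [specGo, pad, hc]
  | cons y ys =>
      have hy : y ≠ "e" := h y (by simp)
      simp [specGo, hy, pad, hc, String.append_assoc]

lemma altGo_spec : ∀ (n : Nat) (l : List String), l.length ≤ n →
    String.join (altGo l) = specGo l 0 := by
  intro n
  induction n with
  | zero =>
      intro l hl
      have : l = [] := by cases l <;> simp_all
      subst this; simp [altGo, specGo, pad, String.join]
  | succ n ih =>
      intro l hl
      cases l with
      | nil => simp [altGo, specGo, pad, String.join]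
      | cons x xs =>
          by_cases hx : x = "e"
          · subst hx
            have he : (("e" : String) == "e") = true := by decide
            have hrest : (xs.dropWhile (fun y => (y == "e") == true)).length ≤ n := by
              have := List.length_dropWhile_le (fun y => (y == "e") == true) xs
              simp only [List.length_cons] at hl
              omega
            have hA : altGo ("e" :: xs) =
                PySem.Int.toStr (((xs.takeWhile (fun y => (y == "e") == true)).length + 1 : Nat) : Int)
                  :: altGo (xs.dropWhile (fun y => (y == "e") == true)) := by
              rw [altGo]
              simp
            have hrun : ∀ y ∈ xs.takeWhile (fun y => (y == "e") == true), y = "e" := by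
              intro y hy
              have := List.mem_takeWhile_imp hy
              simpa using this
            have hhead : ∀ y, (xs.dropWhile (fun y => (y == "e") == true)).head? = some y → y ≠ "e" := by
              intro y hy
              have := head?_dropWhile_false _ xs y hy
              simpa using this
            rw [hA, join_cons, ih _ hrest,
              show specGo ("e" :: xs) 0 = specGo xs 1 from by simp [specGo],
              show xs = xs.takeWhile (fun y => (y == "e") == true)
                      ++ xs.dropWhile (fun y => (y == "e") == true) from
                (List.takeWhile_append_dropWhile).symm,
              specGo_empties _ _ 1 hrun,
              specGo_flush _ _ (by omega) hhead]
            congr 2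
            · simp [pad]
              congr 1
              ring
            · rw [List.takeWhile_append_dropWhile]
          · have hxb : ((x : String) == "e") = false := by simp [hx]
            have hrest : (xs.dropWhile (fun y => (y == "e") == false)).length ≤ n := by
              have := List.length_dropWhile_le (fun y => (y == "e") == false) xs
              simp only [List.length_cons] at hl
              omega
            have hA : altGo (x :: xs) =
                String.join (x :: xs.takeWhile (fun y => (y == "e") == false))
                  :: altGo (xs.dropWhile (fun y => (y == "e") == false)) := by
              rw [altGo]
              simp [hxb]
            have hrun : ∀ y ∈ xs.takeWhile (fun y => (y == "e") == false), y ≠ "e" := by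
              intro y hy
              have := List.mem_takeWhile_imp hy
              simpa using this
            rw [hA, join_cons, ih _ hrest, join_cons,
              show specGo (x :: xs) 0 = pad 0 ++ x ++ specGo xs 0 from by simp [specGo, hx],
              show specGo xs 0 = specGo (xs.takeWhile (fun y => (y == "e") == false)
                      ++ xs.dropWhile (fun y => (y == "e") == false)) 0 from by
                rw [List.takeWhile_append_dropWhile],
              specGo_pieces _ _ hrun]
            simp [pad, String.append_assoc]

-- ===== VERDICT (by name: the statement is the Claim_ definition above) =====
theorem getRowPositionString_spec : Claim_equal_getRowPositionString := by
  intro l _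
  unfold Spec_getRowPositionString getRowPositionString getRowPositionString_alt
  have h1 := aLoop_spec l "" 0
  simp only [Nat.cast_zero] at h1
  rw [h1, altGo_spec l.length l (le_refl _)]
  simp
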